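-- pv_equiv track=rewrite | github.com/weixiang0470/alg112a | homework/hw9/find.py | Modify_maze
-- ===== SOURCE A (Python) =====
-- def Modify_maze(x,y,maze):
--     m2=[]
--     for i in range(len(maze)):
--         s=""
--         for j in range(len(maze[i])):
--             if(i==x and j==y and maze[i][j]=="0"):s+="x"
--             else: s+=maze[i][j]
--         m2.append(s)
--     return m2
-- ===== SOURCE B (Python) =====
-- def Modify_maze(x, y, maze):
--     m2 = list(maze)
--     if 0 <= x < len(m2):
--         row = m2[x]
--         if 0 <= y < len(row) and row[y] == "0":
--             m2[x] = row[:y] + "x" + row[y + 1:]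
--     return m2
-- ===== Notes on version B (the rewrite author's own statement) =====
-- stated objective: faster
-- what changed: B copies the list and rebuilds only the one affected row via slicing, instead of A's nested loop rebuilding every row character by character.
import Mathlib
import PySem

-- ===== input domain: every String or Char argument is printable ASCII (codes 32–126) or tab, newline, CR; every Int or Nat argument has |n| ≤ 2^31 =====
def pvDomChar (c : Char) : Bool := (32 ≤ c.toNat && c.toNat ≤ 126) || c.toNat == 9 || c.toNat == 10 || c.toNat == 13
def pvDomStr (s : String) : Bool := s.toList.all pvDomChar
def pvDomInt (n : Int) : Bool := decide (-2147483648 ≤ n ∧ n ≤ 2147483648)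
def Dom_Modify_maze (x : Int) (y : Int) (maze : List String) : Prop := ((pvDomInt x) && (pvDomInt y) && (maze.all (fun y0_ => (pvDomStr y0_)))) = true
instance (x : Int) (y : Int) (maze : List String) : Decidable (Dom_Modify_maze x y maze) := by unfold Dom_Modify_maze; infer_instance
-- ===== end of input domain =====

-- B copies the list of rows and rebuilds only the single affected row by slicing,
-- instead of A's nested loop rebuilding every row character by character (objective: faster).


-- ===== PORT A =====
-- literal transliteration of A: outer loop over range(len(maze)), inner loop building
-- each row character by character (strings handled as List Char, String.ofList at the end — exact on all inputs)
def Modify_maze (x : Int) (y : Int) (maze : List String) : List String :=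
  (PySem.List.pyRange 0 (maze.length : Int)).foldl (fun m2 i =>
    let row := (PySem.List.pyGetD maze i "").toList
    let s := (PySem.List.pyRange 0 (row.length : Int)).foldl (fun s j =>
      if i = x ∧ j = y ∧ PySem.List.pyGetD row j ' ' = '0' then s ++ ['x']
      else s ++ [PySem.List.pyGetD row j ' ']) []
    m2 ++ [String.ofList s]) []

-- ===== PORT B =====
-- literal transliteration of B: copy the list; if (x,y) is in range and holds '0',
-- replace row x by row[:y] + "x" + row[y+1:]
def Modify_maze_alt (x : Int) (y : Int) (maze : List String) : List String :=
  let m2 := maze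
  if 0 ≤ x ∧ x < (m2.length : Int) then
    let row := (PySem.List.pyGetD m2 x "").toList
    if 0 ≤ y ∧ y < (row.length : Int) ∧ PySem.List.pyGetD row y ' ' = '0' then
      m2.set x.toNat
        (String.ofList (PySem.List.slice row none (some y) ++ ['x'] ++
                        PySem.List.slice row (some (y + 1)) none))
    else m2
  else m2

-- ===== PRECONDITION & SPEC =====
def Spec_Modify_maze (x : Int) (y : Int) (maze : List String) (out : List String) : Prop := out = Modify_maze_alt x y maze
instance (x : Int) (y : Int) (maze : List String) (out : List String) : Decidable (Spec_Modify_maze x y maze out) := by unfold Spec_Modify_maze; infer_instance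

-- ===== CLAIM (what is proved, stated in full; the proofs are below) =====
def Claim_equal_Modify_maze : Prop := ∀ (x : Int) (y : Int) (maze : List String), Dom_Modify_maze x y maze → Spec_Modify_maze x y maze (Modify_maze x y maze)

-- ===== LEMMAS AND PROOFS =====

-- the two-branch append loop of A's inner string builder, as a map
theorem foldl_if_append {α β : Type} (p : β → Prop) [DecidablePred p] (f g : β → α)
    (l : List β) (acc : List α) :
    l.foldl (fun acc x => if p x then acc ++ [f x] else acc ++ [g x]) acc
      = acc ++ l.map (fun x => if p x then f x else g x) := by
  induction l generalizing acc with
  | nil => simp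
  | cons a l ih => simp only [List.foldl_cons, List.map_cons, ih]; split <;> simp

-- map over range of getD is the list itself
theorem map_range_getD {α : Type} (l : List α) (d : α) :
    (List.range l.length).map (fun i => l.getD i d) = l := by
  apply List.ext_getElem
  · simp
  · intro i h1 h2
    simp [List.getD_eq_getElem?_getD, List.getElem?_eq_getElem h2]

-- map over range with a pointwise update is List.set (also when k is out of range)
theorem map_range_ite_set {α : Type} (l : List α) (d : α) (k : Nat) (b : α) :
    (List.range l.length).map (fun i => if i = k then b else l.getD i d) = l.set k b := by
  apply List.ext_getElem
  · simp
  · intro i h1 h2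
    simp only [List.getElem_map, List.getElem_range, List.getElem_set]
    by_cases h : i = k
    · simp [h]
    · simp [h, Ne.symm h, List.getD_eq_getElem?_getD,
        List.getElem?_eq_getElem (by simpa using h1)]

-- A in map form
theorem A_eq_map (x y : Int) (maze : List String) :
    Modify_maze x y maze =
      (List.range maze.length).map (fun i =>
        String.ofList ((List.range (maze.getD i "").toList.length).map (fun (j : Nat) =>
          if (i : Int) = x ∧ (j : Int) = y ∧ (maze.getD i "").toList.getD j ' ' = '0'
          then 'x' else (maze.getD i "").toList.getD j ' '))) := by
  unfold Modify_maze
  rw [PySem.List.pyRange_zero_natCast, List.foldl_map,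
    PySem.List.foldl_append_singleton_eq_map]
  simp only [List.nil_append]
  apply List.map_congr_left
  intro i hi
  simp only [PySem.List.pyGetD_natCast]
  rw [PySem.List.pyRange_zero_natCast, List.foldl_map, foldl_if_append]
  simp only [List.nil_append]
  congr 1
  apply List.map_congr_left
  intro j hj
  simp only [PySem.List.pyGetD_natCast]


-- a row whose update condition never fires is copied verbatim
theorem row_copy (x y : Int) (i : Nat) (l : List Char)
    (h : ∀ j : Nat, j < l.length → ¬((i : Int) = x ∧ (j : Int) = y ∧ l.getD j ' ' = '0')) :
    (List.range l.length).map (fun (j : Nat) =>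
      if (i : Int) = x ∧ (j : Int) = y ∧ l.getD j ' ' = '0' then 'x' else l.getD j ' ') = l := by
  conv_rhs => rw [← map_range_getD l ' ']
  apply List.map_congr_left
  intro j hj
  simp only [List.mem_range] at hj
  rw [if_neg (h j hj)]

theorem Modify_maze_spec : Claim_equal_Modify_maze := by
  intro x y maze _
  unfold Spec_Modify_maze Modify_maze_alt
  rw [A_eq_map]
  by_cases hx : 0 ≤ x ∧ x < (maze.length : Int)
  · rw [if_pos hx]
    have hxn : x = (x.toNat : Int) := (Int.toNat_of_nonneg hx.1).symm
    have hxlt : x.toNat < maze.length := by omega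
    rw [hxn, PySem.List.pyGetD_natCast]
    simp only [Int.toNat_natCast]
    set row := (maze.getD x.toNat "").toList with hrow
    by_cases hy : 0 ≤ y ∧ y < (row.length : Int) ∧ PySem.List.pyGetD row y ' ' = '0'
    · rw [if_pos hy]
      have hyn : y = (y.toNat : Int) := (Int.toNat_of_nonneg hy.1).symm
      have hylt : y.toNat < row.length := by omega
      have hch : row.getD y.toNat ' ' = '0' := by
        have := hy.2.2
        rwa [hyn, PySem.List.pyGetD_natCast] at this
      rw [PySem.List.slice_to row hy.1, PySem.List.slice_from row (by omega : (0:Int) ≤ y + 1)]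
      have hdrop : (y + 1).toNat = y.toNat + 1 := by omega
      rw [hdrop]
      have hset : row.take y.toNat ++ ['x'] ++ row.drop (y.toNat + 1)
          = row.set y.toNat 'x' := by
        rw [List.set_eq_take_cons_drop 'x' hylt]; simp
      rw [hset, ← map_range_ite_set maze "" x.toNat
        (String.ofList (row.set y.toNat 'x'))]
      apply List.map_congr_left
      intro i hi
      by_cases hix : i = x.toNat
      · subst hix
        rw [if_pos rfl, ← hrow]
        congr 1
        rw [← map_range_ite_set row ' ' y.toNat 'x']
        apply List.map_congr_left
        intro j hj
        by_cases hjy : j = y.toNat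
        · subst hjy
          have hc : ((x.toNat : Nat) : Int) = (x.toNat : Int) ∧ ((y.toNat : Nat) : Int) = y ∧
              row.getD y.toNat ' ' = '0' := ⟨rfl, hyn.symm, hch⟩
          rw [if_pos hc, if_pos rfl]
        · have hne : (j : Int) ≠ y := by omega
          simp [hjy, hne]
      · have hne : (i : Int) ≠ (x.toNat : Int) := by exact_mod_cast hix
        rw [if_neg hix, row_copy _ _ _ _ (fun j _ hc => hne hc.1), String.ofList_toList]
    · simp only [hy, if_false]
      calc (List.range maze.length).map (fun i =>
            String.ofList ((List.range (maze.getD i "").toList.length).map (fun (j : Nat) =>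
              if (i : Int) = ↑x.toNat ∧ (j : Int) = y ∧ (maze.getD i "").toList.getD j ' ' = '0'
              then 'x' else (maze.getD i "").toList.getD j ' ')))
          = (List.range maze.length).map (fun i => maze.getD i "") := by
            apply List.map_congr_left
            intro i hi
            rw [row_copy, String.ofList_toList]
            intro j hj hc
            rcases hc with ⟨hix, hjy, hc0⟩
            have hi' : i = x.toNat := by exact_mod_cast hix
            subst hi'
            have hy0 : 0 ≤ y := by omega
            have hyl : y < (row.length : Int) := by rw [hrow]; omega
            have hj' : j = y.toNat := by omega
            subst hj'
            apply hy
            refine ⟨hy0, hyl, ?_⟩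
            rw [(Int.toNat_of_nonneg hy0).symm, PySem.List.pyGetD_natCast, hrow]
            exact hc0
        _ = maze := map_range_getD maze ""
  · simp only [hx, if_false]
    calc (List.range maze.length).map (fun i =>
          String.ofList ((List.range (maze.getD i "").toList.length).map (fun (j : Nat) =>
            if (i : Int) = x ∧ (j : Int) = y ∧ (maze.getD i "").toList.getD j ' ' = '0'
            then 'x' else (maze.getD i "").toList.getD j ' ')))
        = (List.range maze.length).map (fun i => maze.getD i "") := by
          apply List.map_congr_left
          intro i hi
          simp only [List.mem_range] at hi
          rw [row_copy, String.ofList_toList]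
          intro j hj hc
          have : (i : Int) = x := hc.1
          omega
      _ = maze := map_range_getD maze ""
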